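-- pv_equiv track=rewrite | github.com/txotxi/MSc_project | file_modification_precision.py | find_end_main
-- ===== SOURCE A (Python) =====
-- def find_end_main(lines):
--     #Finds the end of the main function
--     main_started=0
--     end_main=-1
--     for i in range(len(lines)):
--         if ("int main(" in lines[i]) or ("int main (" in lines[i]):
--             main_started = 1
--         if "return 0" in lines[i] and main_started:
--             end_main=i
--     return end_main
-- ===== SOURCE B (Python) =====
-- def find_end_main(lines):
--     # Backward scan: the answer is the last 'return 0' line that has a main
--     # signature somewhere at or before it; return the first such index found
--     # from the end (inner any() over the inclusive prefix), else -1.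
--     for j in range(len(lines) - 1, -1, -1):
--         if "return 0" in lines[j] and any(
--                 "int main(" in l or "int main (" in l for l in lines[:j + 1]):
--             return j
--     return -1
-- ===== Notes on version B (the rewrite author's own statement) =====
-- stated objective: alternative
-- what changed: B scans the lines back-to-front and returns the first index from the end whose line contains 'return 0' and whose inclusive prefix contains a main signature (inner any() over the prefix, early return), instead of A's forward flag-carrying accumulator pass.
import Mathlib
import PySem

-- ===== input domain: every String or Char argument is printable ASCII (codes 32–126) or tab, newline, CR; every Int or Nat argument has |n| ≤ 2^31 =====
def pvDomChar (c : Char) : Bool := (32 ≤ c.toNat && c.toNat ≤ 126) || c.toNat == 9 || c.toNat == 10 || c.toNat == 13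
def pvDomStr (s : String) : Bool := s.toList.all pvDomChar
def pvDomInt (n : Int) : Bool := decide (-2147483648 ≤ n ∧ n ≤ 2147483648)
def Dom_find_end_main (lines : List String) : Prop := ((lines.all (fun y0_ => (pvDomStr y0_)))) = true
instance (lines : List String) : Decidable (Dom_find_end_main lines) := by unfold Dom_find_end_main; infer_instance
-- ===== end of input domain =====

-- B replaces A's forward flag-carrying pass with a back-to-front scan that returns the first
-- index from the end whose line contains "return 0" and whose inclusive prefix contains a
-- main signature (alternative formulation; not claimed faster).

-- ===== PORT A =====
def pvIsMain (l : String) : Bool :=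
  PySem.Str.isIn "int main(" l || PySem.Str.isIn "int main (" l

def pvIsRet (l : String) : Bool := PySem.Str.isIn "return 0" l

-- A's for-loop over range(len(lines)): index i, flag main_started (Python int), acc end_main
def pvALoop : List String → Nat → Int → Int → Int
  | [], _, _, em => em
  | l :: ls, i, ms, em =>
      let ms' := if pvIsMain l then 1 else ms
      let em' := if pvIsRet l && decide (ms' ≠ 0) then (i : Int) else em
      pvALoop ls (i + 1) ms' em'

def find_end_main (lines : List String) : Int := pvALoop lines 0 0 (-1)

-- ===== PORT B =====
-- Source B's loop 'for j in range(len(lines)-1, -1, -1)': fuel j+1 means index j is inspected next.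
-- lines[j] is in range here (j < len), so getD is exact; lines[:j+1] is List.take (j+1).
def pvBLoop (lines : List String) : Nat → Int
  | 0 => -1
  | Nat.succ j =>
      if pvIsRet (lines.getD j "") && (lines.take (j + 1)).any pvIsMain
      then (j : Int) else pvBLoop lines j

def find_end_main_alt (lines : List String) : Int := pvBLoop lines lines.length

-- ===== PRECONDITION & SPEC =====
def Spec_find_end_main (lines : List String) (out : Int) : Prop := out = find_end_main_alt lines
instance (lines : List String) (out : Int) : Decidable (Spec_find_end_main lines out) := by unfold Spec_find_end_main; infer_instance

-- ===== CLAIM (what is proved, stated in full; the proofs are below) =====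
def Claim_equal_find_end_main : Prop := ∀ (lines : List String), Dom_find_end_main lines → Spec_find_end_main lines (find_end_main lines)

-- ===== LEMMAS AND PROOFS =====

-- proof-side normal form: index of the first main line, then last "return 0" index from there on
def pvFindStart : List String → Nat → Option Nat
  | [], _ => none
  | l :: ls, i => if pvIsMain l then some i else pvFindStart ls (i + 1)

def pvScanRet : List String → Nat → Int → Int
  | [], _, em => em
  | l :: ls, i, em => pvScanRet ls (i + 1) (if pvIsRet l then (i : Int) else em)

def pvF (lines : List String) : Int :=
  match pvFindStart lines 0 with
  | none => -1
  | some s => pvScanRet (lines.drop s) s (-1)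

-- ---- A-side: find_end_main = pvF ----

theorem pvALoop_none (ls : List String) (i : Nat) (em : Int)
    (h : pvFindStart ls i = none) : pvALoop ls i 0 em = em := by
  induction ls generalizing i em with
  | nil => rfl
  | cons l ls ih =>
      simp only [pvFindStart] at h
      by_cases hm : pvIsMain l
      · simp [hm] at h
      · simp only [pvALoop, hm, Bool.false_eq_true, if_false]
        simpa using ih (i + 1) em (by simpa [hm] using h)

theorem pvALoop_one (ls : List String) (i : Nat) (em : Int) :
    pvALoop ls i 1 em = pvScanRet ls i em := by
  induction ls generalizing i em with
  | nil => rfl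
  | cons l ls ih =>
      simp only [pvALoop, pvScanRet]
      have hms : (if pvIsMain l then (1 : Int) else 1) = 1 := by split <;> rfl
      rw [hms]
      simp only [decide_not, ih]
      congr 1
      by_cases hr : pvIsRet l <;> simp [hr]

theorem pvFindStart_le (ls : List String) (i s : Nat)
    (h : pvFindStart ls i = some s) : i ≤ s := by
  induction ls generalizing i with
  | nil => simp [pvFindStart] at h
  | cons l ls ih =>
      simp only [pvFindStart] at h
      by_cases hm : pvIsMain l
      · simp [hm] at h; omega
      · have := ih (i + 1) (by simpa [hm] using h); omega

theorem pvALoop_some (ls : List String) (i s : Nat) (em : Int)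
    (h : pvFindStart ls i = some s) :
    pvALoop ls i 0 em = pvScanRet (ls.drop (s - i)) s em := by
  induction ls generalizing i em with
  | nil => simp [pvFindStart] at h
  | cons l ls ih =>
      simp only [pvFindStart] at h
      by_cases hm : pvIsMain l
      · simp only [hm, if_pos] at h
        obtain rfl : i = s := by simpa using h
        simp only [Nat.sub_self, List.drop_zero, pvALoop, pvScanRet, hm, if_true, pvALoop_one]
        congr 1
        by_cases hr : pvIsRet l <;> simp [hr]
      · have h' : pvFindStart ls (i + 1) = some s := by simpa [hm] using h
        have hle := pvFindStart_le ls (i + 1) s h'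
        simp only [pvALoop, hm, Bool.false_eq_true, if_false]
        have hdrop : (l :: ls).drop (s - i) = ls.drop (s - (i + 1)) := by
          have : s - i = (s - (i + 1)) + 1 := by omega
          rw [this]; rfl
        rw [hdrop]
        simpa using ih (i + 1) em h'

theorem pvA_eq_F (lines : List String) : find_end_main lines = pvF lines := by
  unfold find_end_main pvF
  cases h : pvFindStart lines 0 with
  | none => exact pvALoop_none lines 0 (-1) h
  | some s => simpa using pvALoop_some lines 0 s (-1) h

-- ---- B-side: find_end_main_alt = pvF ----

theorem pvFindStart_none_iff (ls : List String) (i : Nat) :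
    pvFindStart ls i = none ↔ ls.any pvIsMain = false := by
  induction ls generalizing i with
  | nil => simp [pvFindStart]
  | cons l ls ih =>
      by_cases hm : pvIsMain l
      · simp [pvFindStart, hm]
      · simp [pvFindStart, hm, ih (i + 1)]

theorem pvFindStart_lt (ls : List String) (i s : Nat)
    (h : pvFindStart ls i = some s) : s < i + ls.length := by
  induction ls generalizing i with
  | nil => simp [pvFindStart] at h
  | cons l ls ih =>
      simp only [pvFindStart] at h
      by_cases hm : pvIsMain l
      · simp [hm] at h; simp; omega
      · have := ih (i + 1) (by simpa [hm] using h); simp; omega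

theorem pvFindStart_append_some (ls ys : List String) (i s : Nat)
    (h : pvFindStart ls i = some s) : pvFindStart (ls ++ ys) i = some s := by
  induction ls generalizing i with
  | nil => simp [pvFindStart] at h
  | cons l ls ih =>
      simp only [List.cons_append, pvFindStart] at h ⊢
      by_cases hm : pvIsMain l
      · simpa [hm] using h
      · simp only [hm, Bool.false_eq_true, if_false] at h ⊢
        exact ih (i + 1) h

theorem pvFindStart_append_none (ls : List String) (l : String) (i : Nat)
    (h : pvFindStart ls i = none) :
    pvFindStart (ls ++ [l]) i = if pvIsMain l then some (i + ls.length) else none := by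
  induction ls generalizing i with
  | nil => simp [pvFindStart]
  | cons x ls ih =>
      simp only [pvFindStart] at h
      by_cases hm : pvIsMain x
      · simp [hm] at h
      · simp only [List.cons_append, pvFindStart, hm, Bool.false_eq_true, if_false]
        rw [ih (i + 1) (by simpa [hm] using h)]
        simp only [List.length_cons]
        congr 2
        omega

theorem pvScanRet_append (xs : List String) (l : String) (i : Nat) (em : Int) :
    pvScanRet (xs ++ [l]) i em
      = if pvIsRet l then ((i + xs.length : Nat) : Int) else pvScanRet xs i em := by
  induction xs generalizing i em with
  | nil => simp [pvScanRet]
  | cons x xs ih =>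
      simp only [List.cons_append, pvScanRet, ih, List.length_cons]
      congr 2
      omega

theorem pvBLoop_prefix (ls : List String) (l : String) (j : Nat) (hj : j ≤ ls.length) :
    pvBLoop (ls ++ [l]) j = pvBLoop ls j := by
  induction j with
  | zero => rfl
  | succ j ih =>
      simp only [pvBLoop]
      rw [List.getD_append _ _ _ _ (by omega), List.take_append_of_le_length (by omega),
        ih (by omega)]

theorem pvB_eq_F (lines : List String) : find_end_main_alt lines = pvF lines := by
  unfold find_end_main_alt
  induction lines using List.reverseRecOn with
  | nil => rfl
  | append_singleton ls l ih =>
      simp only [List.length_append, List.length_singleton]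
      have hstep : pvBLoop (ls ++ [l]) (ls.length + 1)
          = if pvIsRet l && (ls ++ [l]).any pvIsMain then (ls.length : Int)
            else pvBLoop ls ls.length := by
        simp only [pvBLoop]
        rw [List.getD_append_right _ _ _ _ (le_refl _)]
        rw [show ls.length - ls.length = 0 from by omega]
        rw [show ls.length + 1 = (ls ++ [l]).length from by simp]
        rw [List.take_length, pvBLoop_prefix ls l ls.length (le_refl _)]
        rfl
      rw [hstep, ih]
      by_cases hany : (ls ++ [l]).any pvIsMain
      · cases hfs : pvFindStart ls 0 with
        | some s =>
            have hlt : s < ls.length := by simpa using pvFindStart_lt ls 0 s hfs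
            have hdrop : (ls ++ [l]).drop s = ls.drop s ++ [l] := by
              rw [List.drop_append_of_le_length (by omega)]
            have hF : pvF (ls ++ [l]) = pvScanRet (ls.drop s ++ [l]) s (-1) := by
              unfold pvF
              rw [pvFindStart_append_some ls [l] 0 s hfs, ← hdrop]
            have hF2 : pvF ls = pvScanRet (ls.drop s) s (-1) := by
              unfold pvF; rw [hfs]
            have hlen : s + (ls.drop s).length = ls.length := by
              simp [List.length_drop]; omega
            rw [hF, hF2, pvScanRet_append, hlen]
            simp [hany]
        | none =>
            have hnone : ls.any pvIsMain = false := (pvFindStart_none_iff ls 0).mp hfs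
            have hl : pvIsMain l = true := by
              have h2 := hany
              simp only [List.any_append, hnone, Bool.false_or, List.any_cons,
                List.any_nil, Bool.or_false] at h2
              exact h2
            have hF : pvF (ls ++ [l]) = pvScanRet [l] ls.length (-1) := by
              unfold pvF
              rw [pvFindStart_append_none ls l 0 hfs]
              simp only [hl, if_true, Nat.zero_add]
              rw [List.drop_append_of_le_length (le_refl _), List.drop_length,
                List.nil_append]
            have hF2 : pvF ls = -1 := by unfold pvF; rw [hfs]
            rw [hF, hF2]
            simp [pvScanRet, hany]
      · have hfalse : (ls ++ [l]).any pvIsMain = false := by simpa using hany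
        have hpair : ls.any pvIsMain = false := by
          simp only [List.any_append, Bool.or_eq_false_iff] at hfalse
          exact hfalse.1
        have hnone : pvFindStart (ls ++ [l]) 0 = none := (pvFindStart_none_iff _ 0).mpr hfalse
        have hnone' : pvFindStart ls 0 = none := (pvFindStart_none_iff _ 0).mpr hpair
        have hF : pvF (ls ++ [l]) = -1 := by unfold pvF; rw [hnone]
        have hF2 : pvF ls = -1 := by unfold pvF; rw [hnone']
        rw [hF, hF2]
        simp [hany]

-- ===== VERDICT (by name: the statement is the Claim_ definition above) =====
theorem find_end_main_spec : Claim_equal_find_end_main := by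
  intro lines _
  unfold Spec_find_end_main
  rw [pvA_eq_F, pvB_eq_F]
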